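-- pv_equiv track=rewrite | github.com/Willyoung2017/event-process-tracie | code/extract_event_chains.py | get_tmp_arg
-- ===== SOURCE A (Python) =====
-- def get_tmp_arg(tags):
--     res = []
--     for i, tag in enumerate(tags):
--         if tag == "B-ARGM-TMP":
--             cur_group = [i, -1]
--             for j in range(i + 1, len(tags) + 1):
--                 if j == len(tags) or tags[j] != "I-ARGM-TMP":
--                     cur_group[1] = j
--                     break
--             res.append(cur_group)
--     return res
-- ===== SOURCE B (Python) =====
-- def get_tmp_arg(tags):
--     res = []
--     start = None
--     for i, tag in enumerate(tags):
--         if tag == "B-ARGM-TMP":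
--             if start is not None:
--                 res.append([start, i])
--             start = i
--         elif tag != "I-ARGM-TMP":
--             if start is not None:
--                 res.append([start, i])
--             start = None
--     if start is not None:
--         res.append([start, len(tags)])
--     return res
-- ===== Notes on version B (the rewrite author's own statement) =====
-- stated objective: simpler
-- what changed: Replaced the outer loop with an inner forward rescan for each B tag by a single pass that keeps one open-group start index and closes it at the next non-I tag (or at the end of the list).
import Mathlib
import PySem

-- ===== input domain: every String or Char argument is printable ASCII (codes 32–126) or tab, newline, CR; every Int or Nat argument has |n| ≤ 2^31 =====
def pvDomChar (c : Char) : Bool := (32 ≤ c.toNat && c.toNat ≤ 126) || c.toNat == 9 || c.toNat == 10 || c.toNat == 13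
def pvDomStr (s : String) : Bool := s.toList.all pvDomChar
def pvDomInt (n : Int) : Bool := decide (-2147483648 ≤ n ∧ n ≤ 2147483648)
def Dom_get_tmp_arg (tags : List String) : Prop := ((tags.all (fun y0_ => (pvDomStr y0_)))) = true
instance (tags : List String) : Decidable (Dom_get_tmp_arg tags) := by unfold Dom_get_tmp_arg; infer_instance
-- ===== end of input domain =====

-- B replaces A's per-B-tag inner forward rescan by a single pass keeping one open-group
-- start index (objective: simpler); return values agree on all inputs, both are total.

-- ===== PORT A =====
-- A's inner loop: for j in range(i+1, len+1): break at the first j with j == len or tags[j] != "I-ARGM-TMP"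
def findEndA (tags : List String) (j : Nat) : Nat :=
  if h : j < tags.length then
    if tags[j] = "I-ARGM-TMP" then findEndA tags (j + 1) else j
  else j
termination_by tags.length - j

-- A's outer loop: for i, tag in enumerate(tags), appending [i, end] when tag == "B-ARGM-TMP"
def goA (tags : List String) (i : Nat) : List (List Int) :=
  if h : i < tags.length then
    (if tags[i] = "B-ARGM-TMP" then [[(i : Int), (findEndA tags (i + 1) : Int)]] else [])
      ++ goA tags (i + 1)
  else []
termination_by tags.length - i

def get_tmp_arg (tags : List String) : List (List Int) := goA tags 0

-- ===== PORT B =====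
-- B's single pass: state = (emitted groups, start of the currently open group, if any)
def goB (ts : List String) (i : Nat) (start : Option Nat) : List (List Int) :=
  match ts with
  | [] =>
    match start with
    | some s => [[(s : Int), (i : Int)]]
    | none => []
  | t :: rest =>
    if t = "B-ARGM-TMP" then
      (match start with | some s => [[(s : Int), (i : Int)]] | none => []) ++ goB rest (i + 1) (some i)
    else if t = "I-ARGM-TMP" then
      goB rest (i + 1) start
    else
      (match start with | some s => [[(s : Int), (i : Int)]] | none => []) ++ goB rest (i + 1) none

def get_tmp_arg_alt (tags : List String) : List (List Int) := goB tags 0 none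

-- ===== PRECONDITION & SPEC =====
def Spec_get_tmp_arg (tags : List String) (out : List (List Int)) : Prop := out = get_tmp_arg_alt tags
instance (tags : List String) (out : List (List Int)) : Decidable (Spec_get_tmp_arg tags out) := by unfold Spec_get_tmp_arg; infer_instance

-- ===== CLAIM (what is proved, stated in full; the proofs are below) =====
def Claim_equal_get_tmp_arg : Prop := ∀ (tags : List String), Dom_get_tmp_arg tags → Spec_get_tmp_arg tags (get_tmp_arg tags)

-- ===== LEMMAS AND PROOFS =====

theorem findEndA_ge (tags : List String) (j : Nat) : j ≤ findEndA tags j := by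
  unfold findEndA
  split
  · split
    · have := findEndA_ge tags (j + 1); omega
    · omega
  · omega
termination_by tags.length - j

-- A's outer loop skips the run of "I-ARGM-TMP" tags that findEndA scans over
theorem goA_skip (tags : List String) (j : Nat) : goA tags j = goA tags (findEndA tags j) := by
  unfold findEndA
  split
  · rename_i h
    split
    · rename_i hI
      have hstep : goA tags j = goA tags (j + 1) := by
        rw [goA]
        simp [h, hI]
      rw [hstep]
      exact goA_skip tags (j + 1)
    · rfl
  · rfl
termination_by tags.length - j

-- closing an open group: B emits [s, findEndA tags j] and continues with no open group
theorem goB_open (tags : List String) (j : Nat) (s : Nat) :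
    goB (tags.drop j) j (some s)
      = [(s : Int), (findEndA tags j : Int)] :: goB (tags.drop (findEndA tags j)) (findEndA tags j) none := by
  by_cases h : j < tags.length
  · rw [List.drop_eq_getElem_cons h]
    by_cases hB : tags[j] = "B-ARGM-TMP"
    · have hE : findEndA tags j = j := by rw [findEndA]; simp [h, hB]
      rw [hE, List.drop_eq_getElem_cons h]
      simp [goB, hB]
    · by_cases hI : tags[j] = "I-ARGM-TMP"
      · have hE : findEndA tags j = findEndA tags (j + 1) := by rw [findEndA]; simp [h, hI]
        rw [hE]
        have := goB_open tags (j + 1) s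
        simpa [goB, hB, hI] using this
      · have hE : findEndA tags j = j := by rw [findEndA]; simp [h, hI]
        rw [hE, List.drop_eq_getElem_cons h]
        simp [goB, hB, hI]
  · have hE : findEndA tags j = j := by rw [findEndA]; simp [h]
    have hd : tags.drop j = [] := List.drop_eq_nil_of_le (by omega)
    rw [hE, hd]
    simp [goB]
termination_by tags.length - j

theorem goB_eq_goA (tags : List String) (j : Nat) : goB (tags.drop j) j none = goA tags j := by
  by_cases h : j < tags.length
  · rw [List.drop_eq_getElem_cons h]
    by_cases hB : tags[j] = "B-ARGM-TMP"
    · have hopen := goB_open tags (j + 1) j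
      have hge : j + 1 ≤ findEndA tags (j + 1) := findEndA_ge tags (j + 1)
      have hrec : goB (tags.drop (findEndA tags (j + 1))) (findEndA tags (j + 1)) none
          = goA tags (findEndA tags (j + 1)) := goB_eq_goA tags (findEndA tags (j + 1))
      rw [goA]
      simp only [h, dif_pos, hB, if_pos]
      rw [goA_skip tags (j + 1)]
      simp [goB, hopen, hrec]
    · by_cases hI : tags[j] = "I-ARGM-TMP"
      · have := goB_eq_goA tags (j + 1)
        rw [goA]
        simp [goB, h, hI, this]
      · have := goB_eq_goA tags (j + 1)
        rw [goA]
        simp [goB, h, hB, hI, this]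
  · have hd : tags.drop j = [] := List.drop_eq_nil_of_le (by omega)
    rw [hd, goA]
    simp [goB, h]
termination_by tags.length - j

-- ===== VERDICT (by name: the statement is the Claim_ definition above) =====
theorem get_tmp_arg_spec : Claim_equal_get_tmp_arg := by
  intro tags _
  unfold Spec_get_tmp_arg get_tmp_arg get_tmp_arg_alt
  have := goB_eq_goA tags 0
  simpa using this.symm
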